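-- pv_equiv track=rewrite | github.com/twalla26/2022_TGwinG_NP_Song_Sumin | SongSumin_4week_assignment.py | stock_price
-- ===== SOURCE A (Python) =====
-- def stock_price(stockChart):
--     answer = str()
--     # your code
--     price = 0
--     priceList = []
--     for i in stockChart:
--         price += i
--         priceList.append(price)
--     priceList.reverse()
--     n = min(priceList)
--     k = priceList.index(n)
--     if priceList[0] - min(priceList) > 0:
--         answer = "%s일 전에 샀어야지 으이구" %k
--         return answer
--     else:
--         answer = "아니야 조금만 더 기다려"
--         return answer
-- ===== SOURCE B (Python) =====
-- def stock_price(stockChart):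
--     total = 0
--     best = None  # (minimum prefix sum so far, index of its LAST occurrence)
--     for i, x in enumerate(stockChart):
--         total += x
--         if best is None or total <= best[0]:
--             best = (total, i)
--     min_val, min_idx = best
--     k = len(stockChart) - 1 - min_idx
--     if total - min_val > 0:
--         return "%s일 전에 샀어야지 으이구" % k
--     else:
--         return "아니야 조금만 더 기다려"
-- ===== Notes on version B (the rewrite author's own statement) =====
-- stated objective: alternative
-- what changed: Replaced A's build-prefix-list / reverse / min / index passes by a single left-to-right scan keeping the running total and the last index of the minimal prefix sum, with k recovered as len-1-index; no intermediate list is built.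
import Mathlib
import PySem

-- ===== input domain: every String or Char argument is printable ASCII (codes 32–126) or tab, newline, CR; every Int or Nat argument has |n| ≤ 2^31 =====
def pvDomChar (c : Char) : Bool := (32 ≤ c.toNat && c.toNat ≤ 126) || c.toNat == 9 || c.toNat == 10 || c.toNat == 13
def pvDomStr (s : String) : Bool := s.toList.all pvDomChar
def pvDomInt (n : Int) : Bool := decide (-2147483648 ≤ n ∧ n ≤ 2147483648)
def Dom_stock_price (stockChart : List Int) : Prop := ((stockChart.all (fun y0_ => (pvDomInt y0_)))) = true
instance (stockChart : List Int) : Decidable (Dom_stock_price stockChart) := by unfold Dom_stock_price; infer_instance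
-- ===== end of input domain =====

-- B replaces A's build-prefix-list / reverse / min / index passes by a single scan that
-- tracks the running total and the last index of the minimal prefix sum (alternative decomposition).


-- ===== PORT A =====
def stock_price (stockChart : List Int) : String :=
  let st := stockChart.foldl (fun (s : Int × List Int) i => (s.1 + i, s.2 ++ [s.1 + i])) (0, ([] : List Int))
  let priceList := st.2.reverse
  match PySem.List.min? priceList (fun x => x) with
  | none => ""  -- min([]) raises ValueError; excluded by Pre_
  | some n =>
    match PySem.List.index? priceList n with
    | none => ""  -- unreachable: n is a member of priceList
    | some k =>
      match PySem.List.pyGet? priceList 0 with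
      | none => ""  -- unreachable under Pre_
      | some p0 =>
        if p0 - n > 0 then PySem.Int.toStr (k : Int) ++ "일 전에 샀어야지 으이구"
        else "아니야 조금만 더 기다려"

-- ===== PORT B =====
-- the for-loop of Source B: state = (total, best); best = none before the first element
def bLoop (xs : List Int) (i : Int) (total : Int) (best : Option (Int × Int)) :
    Int × Option (Int × Int) :=
  match xs with
  | [] => (total, best)
  | x :: rest =>
    let t := total + x
    let b := match best with
      | none => some (t, i)
      | some (m, j) => if t ≤ m then some (t, i) else some (m, j)
    bLoop rest (i + 1) t b

def stock_price_alt (stockChart : List Int) : String :=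
  match bLoop stockChart 0 0 none with
  | (_, none) => ""  -- empty input: Source B raises unpacking None; excluded by Pre_
  | (total, some (m, j)) =>
    let k := (stockChart.length : Int) - 1 - j
    if total - m > 0 then PySem.Int.toStr k ++ "일 전에 샀어야지 으이구"
    else "아니야 조금만 더 기다려"

-- ===== PRECONDITION & SPEC =====
-- Pre_ excludes only the empty list, on which A raises ValueError (min of an empty list).
def Pre_stock_price (stockChart : List Int) : Prop := stockChart ≠ []
instance (stockChart : List Int) : Decidable (Pre_stock_price stockChart) := by
  unfold Pre_stock_price; infer_instance

def pvWitness_stock_price : List Int := [3, -4, 1]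

def Spec_stock_price (stockChart : List Int) (out : String) : Prop := out = stock_price_alt stockChart
instance (stockChart : List Int) (out : String) : Decidable (Spec_stock_price stockChart out) := by unfold Spec_stock_price; infer_instance

-- ===== CLAIM (what is proved, stated in full; the proofs are below) =====
def Claim_equal_stock_price : Prop := ∀ (stockChart : List Int), Dom_stock_price stockChart → Pre_stock_price stockChart → Spec_stock_price stockChart (stock_price stockChart)

-- ===== LEMMAS AND PROOFS =====

-- the list of prefix sums of xs starting from accumulator t
def prices (t : Int) : List Int → List Int
  | [] => []
  | x :: r => (t + x) :: prices (t + x) r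

-- first minimal element of a list together with its (first) index
def fm : List Int → Option (Int × Nat)
  | [] => none
  | x :: r =>
    match fm r with
    | none => some (x, 0)
    | some (m, j) => if x ≤ m then some (x, 0) else some (m, j + 1)

theorem fm_cons (x : Int) (r : List Int) :
    fm (x :: r) = match fm r with
      | none => some (x, 0)
      | some (m, j) => if x ≤ m then some (x, 0) else some (m, j + 1) := rfl

theorem prices_length (t : Int) (xs : List Int) : (prices t xs).length = xs.length := by
  induction xs generalizing t with
  | nil => rfl
  | cons x r ih => simp [prices, ih]

theorem foldA (xs : List Int) : ∀ (acc : Int) (pref : List Int),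
    xs.foldl (fun (s : Int × List Int) i => (s.1 + i, s.2 ++ [s.1 + i])) (acc, pref)
      = (acc + xs.sum, pref ++ prices acc xs) := by
  induction xs with
  | nil => intro acc pref; simp [prices]
  | cons x r ih =>
    intro acc pref
    simp only [List.foldl_cons, ih, prices, List.sum_cons, List.append_assoc,
      List.singleton_append, Prod.mk.injEq]
    exact ⟨by ring, trivial⟩

theorem fm_none_iff (L : List Int) : fm L = none ↔ L = [] := by
  cases L with
  | nil => simp [fm]
  | cons x r =>
    rw [fm_cons]
    cases h : fm r with
    | none => simp
    | some p => obtain ⟨m, j⟩ := p; by_cases hx : x ≤ m <;> simp [hx]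

theorem foldl_min_assoc (r : List Int) : ∀ a b : Int,
    r.foldl min (min a b) = min a (r.foldl min b) := by
  induction r with
  | nil => intro a b; rfl
  | cons c r ih =>
    intro a b
    simp only [List.foldl_cons]
    rw [min_assoc, ih]

theorem fm_val (L : List Int) : ∀ x : Int, (fm (x :: L)).map (·.1) = some (L.foldl min x) := by
  induction L with
  | nil => intro x; simp [fm]
  | cons y r ih =>
    intro x
    have hy := ih y
    rw [fm_cons x (y :: r)]
    cases h : fm (y :: r) with
    | none => rw [h] at hy; simp at hy
    | some p =>
      obtain ⟨m, j⟩ := p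
      rw [h] at hy
      simp only [Option.map_some, Option.some_inj] at hy
      have hm : m = r.foldl min y := by simpa using hy
      subst hm
      simp only [List.foldl_cons]
      rw [foldl_min_assoc]
      by_cases hx : x ≤ r.foldl min y <;> simp [hx, min_def] <;> omega

theorem min?_eq_fm (L : List Int) :
    PySem.List.min? L (fun y => y) = (fm L).map (·.1) := by
  cases L with
  | nil => simp [PySem.List.min?_eq_none_iff, fm]
  | cons x r => rw [PySem.List.min?_id_cons, fm_val]

theorem fm_index (L : List Int) : ∀ (m : Int) (j : Nat), fm L = some (m, j) →
    PySem.List.index? L m = some j := by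
  induction L with
  | nil => intro m j h; simp [fm] at h
  | cons x r ih =>
    intro m j h
    rw [fm_cons] at h
    cases hr : fm r with
    | none =>
      rw [hr] at h
      simp only [Option.some_inj, Prod.mk.injEq] at h
      obtain ⟨rfl, rfl⟩ := h
      rw [PySem.List.index?_cons_self]
    | some p =>
      obtain ⟨m', j'⟩ := p
      rw [hr] at h
      have h' : (if x ≤ m' then some (x, 0) else some (m', j' + 1)) = some (m, j) := h
      by_cases hx : x ≤ m'
      · rw [if_pos hx] at h'
        simp only [Option.some_inj, Prod.mk.injEq] at h'
        obtain ⟨rfl, rfl⟩ := h'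
        rw [PySem.List.index?_cons_self]
      · rw [if_neg hx] at h'
        simp only [Option.some_inj, Prod.mk.injEq] at h'
        obtain ⟨rfl, rfl⟩ := h'
        have hcons := PySem.List.index?_cons_of_ne (x := x) (v := m') r (by omega)
        rw [hcons, ih m' j' hr]
        rfl

theorem fm_append (L : List Int) (x : Int) :
    fm (L ++ [x]) = match fm L with
      | none => some (x, 0)
      | some (m, j) => if m ≤ x then some (m, j) else some (x, L.length) := by
  induction L with
  | nil => simp [fm]
  | cons y r ih =>
    rw [List.cons_append, fm_cons, ih, fm_cons y r]
    cases hr : fm r with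
    | none =>
      have hr' : r = [] := (fm_none_iff r).1 hr
      subst hr'
      by_cases h1 : y ≤ x <;> by_cases h2 : x ≤ y <;>
        simp [h1, h2] <;> omega
    | some p =>
      obtain ⟨m, j⟩ := p
      by_cases h1 : m ≤ x <;> by_cases h2 : y ≤ m <;> by_cases h3 : y ≤ x <;>
        simp [h1, h2, h3, List.length_cons] <;> omega

theorem getLast?_prices (xs : List Int) : ∀ t : Int, xs ≠ [] →
    (prices t xs).getLast? = some (t + xs.sum) := by
  induction xs with
  | nil => intro t h; exact absurd rfl h
  | cons x r ih =>
    intro t _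
    cases r with
    | nil => simp [prices]
    | cons y s =>
      have h1 : prices t (x :: y :: s) = (t + x) :: prices (t + x) (y :: s) := rfl
      have h2 : prices (t + x) (y :: s) = ((t + x) + y) :: prices ((t + x) + y) s := rfl
      rw [h1, h2, List.getLast?_cons_cons, ← h2, ih (t + x) (by simp)]
      simp only [List.sum_cons, Option.some_inj]
      ring

-- main invariant of B's loop: it computes the running total and tracks exactly the
-- first minimum (value, index) of the REVERSED prefix-sum list
theorem bLoop_key (xs : List Int) : ∀ (t m j i : Int),
    bLoop xs i t (some (m, j)) = (t + xs.sum, some (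
      match fm (prices t xs).reverse with
      | none => (m, j)
      | some (mv, r) => if mv ≤ m then (mv, i + ((xs.length : Int) - 1 - r)) else (m, j))) := by
  induction xs with
  | nil => intro t m j i; simp [bLoop, prices, fm]
  | cons x rest ih =>
    intro t m j i
    have hrev : (prices t (x :: rest)).reverse
        = (prices (t + x) rest).reverse ++ [t + x] := by simp [prices]
    rw [show bLoop (x :: rest) i t (some (m, j))
        = bLoop rest (i + 1) (t + x)
            (if t + x ≤ m then some (t + x, i) else some (m, j)) from rfl]
    rw [hrev, fm_append]
    cases hr : fm (prices (t + x) rest).reverse with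
    | none =>
      have h0 : (prices (t + x) rest).reverse = [] := (fm_none_iff _).1 hr
      have hrest : rest = [] := by
        have := congrArg List.length h0
        simpa [prices_length] using this
      subst hrest
      simp only [bLoop, List.sum_cons, List.sum_nil, List.length_cons, List.length_nil]
      split_ifs <;>
        simp only [Prod.mk.injEq, Option.some_inj, true_and, and_true] <;>
        push_cast <;> omega
    | some p =>
      obtain ⟨mv, r⟩ := p
      by_cases h1 : t + x ≤ m
      · rw [if_pos h1, ih, hr]
        by_cases h2 : mv ≤ t + x
        · have h3 : mv ≤ m := le_trans h2 h1
          simp [h2, h3, prices_length, Prod.mk.injEq] <;> push_cast <;> (try constructor) <;> omega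
        · simp [h2, h1, prices_length, Prod.mk.injEq] <;> push_cast <;> (try constructor) <;> omega
      · rw [if_neg h1, ih, hr]
        by_cases h2 : mv ≤ t + x
        · by_cases h3 : mv ≤ m
          · simp [h2, h3, prices_length, Prod.mk.injEq] <;> push_cast <;> (try constructor) <;> omega
          · simp [h2, h3, prices_length, Prod.mk.injEq] <;> push_cast <;> (try constructor) <;> omega
        · have h3 : ¬ mv ≤ m := by omega
          simp [h2, h3, h1, prices_length, Prod.mk.injEq] <;> push_cast <;> (try constructor) <;> omega

-- ===== VERDICT (by name: the statement is the Claim_ definition above) =====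
theorem stock_price_spec : Claim_equal_stock_price := by
  intro xs _ hpre
  unfold Spec_stock_price
  cases xs with
  | nil => exact absurd rfl hpre
  | cons x rest =>
    have hrev : (prices 0 (x :: rest)).reverse = (prices x rest).reverse ++ [x] := by
      have : prices 0 (x :: rest) = (0 + x) :: prices (0 + x) rest := rfl
      rw [this]
      norm_num
    have hlast : PySem.List.pyGet? (prices 0 (x :: rest)).reverse 0
        = some (x + rest.sum) := by
      rw [PySem.List.pyGet?_zero, ← List.head?_eq_getElem?,
        List.head?_reverse, getLast?_prices _ 0 (by simp)]
      norm_num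
    have hB : stock_price_alt (x :: rest)
        = match bLoop (x :: rest) 0 0 none with
          | (_, none) => ""
          | (total, some (m, j)) =>
            if total - m > 0 then
              PySem.Int.toStr (((x :: rest).length : Int) - 1 - j) ++ "일 전에 샀어야지 으이구"
            else "아니야 조금만 더 기다려" := rfl
    have hBl : bLoop (x :: rest) 0 0 none = bLoop rest 1 x (some (x, 0)) := by
      show bLoop rest (0 + 1) (0 + x) (some (0 + x, 0)) = _
      norm_num
    simp only [stock_price, foldA, List.nil_append, min?_eq_fm]
    rw [hrev, fm_append, hB, hBl, bLoop_key]
    cases hr : fm (prices x rest).reverse with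
    | none =>
      have h0 : (prices x rest).reverse = [] := (fm_none_iff _).1 hr
      have hrest : rest = [] := by
        have := congrArg List.length h0
        simpa [prices_length] using this
      subst hrest
      simp only [Option.map_some]
      rw [show PySem.List.index? ((prices x []).reverse ++ [x]) x = some 0 by
        rw [h0]; simpa using PySem.List.index?_cons_self (x := x) (xs := [])]
      rw [← hrev, hlast]
      norm_num
    | some p =>
      obtain ⟨mv, r⟩ := p
      by_cases h2 : mv ≤ x
      · have hidx : PySem.List.index? ((prices x rest).reverse ++ [x]) mv = some r := by
          apply fm_index
          rw [fm_append, hr]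
          simp [h2]
        simp only [if_pos h2, Option.map_some]
        rw [hidx, ← hrev, hlast]
        simp only [List.length_cons]
        by_cases hc : x + rest.sum - mv > 0
        · rw [if_pos hc, if_pos hc]
          congr 2
          push_cast
          ring
        · rw [if_neg hc, if_neg hc]
      · have hidx : PySem.List.index? ((prices x rest).reverse ++ [x]) x
            = some ((prices x rest).reverse).length := by
          apply fm_index
          rw [fm_append, hr]
          simp [h2]
        simp only [if_neg h2, Option.map_some]
        rw [hidx, ← hrev, hlast]
        simp only [List.length_cons, List.length_reverse, prices_length]
        by_cases hc : x + rest.sum - x > 0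
        · rw [if_pos hc, if_pos hc]
          congr 2
          push_cast
          ring
        · rw [if_neg hc, if_neg hc]
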